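-- pv_equiv track=rewrite | github.com/adiglase/ask_quran_rag | app/ingest.py | _first_existing
-- ===== SOURCE A (Python) =====
-- from collections.abc import Callable, Sequence
--
-- def _first_existing(available: Sequence[str], preferred: Sequence[str]) -> str | None:
--     available_by_lower = {item.lower(): item for item in available}
--     for candidate in preferred:
--         match = available_by_lower.get(candidate)
--         if match is not None:
--             return match
--     if len(available) == 1:
--         return available[0]
--     return None
-- ===== SOURCE B (Python) =====
-- def _first_existing(available, preferred):
--     # Inverted traversal: rank each preferred name by its first index, then a
--     # single pass over `available` keeps the item whose lowercased form has the
--     # smallest rank; on an equal rank the later item wins (this matches the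
--     # dict's last-wins semantics on duplicate lowercased names).
--     rank = {}
--     for i, cand in enumerate(preferred):
--         if cand not in rank:
--             rank[cand] = i
--     best = None  # (rank, item)
--     for item in available:
--         i = rank.get(item.lower())
--         if i is not None:
--             if best is None or i <= best[0]:
--                 best = (i, item)
--     if best is not None:
--         return best[1]
--     if len(available) == 1:
--         return available[0]
--     return None
-- ===== Notes on version B (the rewrite author's own statement) =====
-- stated objective: alternative
-- what changed: Inverts the traversal: instead of indexing available by lowercase and scanning preferred for the first hit, B ranks each preferred name by its first index and makes a single pass over available keeping the item whose lowercased form has the smallest rank (argmin accumulator, later item wins ties to match dict last-wins).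
import Mathlib
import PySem

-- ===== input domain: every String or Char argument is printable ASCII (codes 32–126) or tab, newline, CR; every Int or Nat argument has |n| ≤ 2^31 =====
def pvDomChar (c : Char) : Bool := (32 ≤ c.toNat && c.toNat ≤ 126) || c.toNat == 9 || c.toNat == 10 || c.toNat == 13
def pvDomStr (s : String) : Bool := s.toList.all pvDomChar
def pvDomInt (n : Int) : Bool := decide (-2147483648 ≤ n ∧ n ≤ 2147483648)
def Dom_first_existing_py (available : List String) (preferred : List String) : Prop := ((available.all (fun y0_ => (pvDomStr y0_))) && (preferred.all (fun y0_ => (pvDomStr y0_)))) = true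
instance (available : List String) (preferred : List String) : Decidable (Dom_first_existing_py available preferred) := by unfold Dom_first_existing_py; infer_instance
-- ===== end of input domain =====

-- B inverts the traversal: one pass over `available` keeping the item whose lowercase occurs earliest in `preferred` (argmin accumulator, last wins ties); same return value, alternative algorithm.


-- ===== PORT A =====
-- literal port of A: build the lowered-key dict, then scan preferred for the first hit
def aDict (available : List String) : PySem.Dict String String :=
  available.foldl (fun d item => d.insert (PySem.Str.lower item) item) PySem.Dict.empty

def aLoop (d : PySem.Dict String String) : List String → Option String
  | [] => none
  | candidate :: rest =>
    match d.get? candidate with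
    | some m => some m
    | none => aLoop d rest

def first_existing_py (available : List String) (preferred : List String) : Option String :=
  match aLoop (aDict available) preferred with
  | some m => some m
  | none => if available.length == 1 then available.head? else none

-- ===== PORT B =====
-- port of B: rank = {cand: first index} over preferred, then a single fold over
-- available keeping (rank, item); ties (i ≤ best) take the later item
def bRank (preferred : List String) : PySem.Dict String Nat :=
  (preferred.foldl
    (fun (s : PySem.Dict String Nat × Nat) cand =>
      (if s.1.contains cand then s.1 else s.1.insert cand s.2, s.2 + 1))
    (PySem.Dict.empty, 0)).1

def bStep (rank : PySem.Dict String Nat) (best : Option (Nat × String)) (item : String) : Option (Nat × String) :=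
  match rank.get? (PySem.Str.lower item) with
  | some i =>
    match best with
    | none => some (i, item)
    | some (j, _) => if i ≤ j then some (i, item) else best
  | none => best

def first_existing_py_alt (available : List String) (preferred : List String) : Option String :=
  match available.foldl (bStep (bRank preferred)) none with
  | some (_, item) => some item
  | none => if available.length == 1 then available.head? else none

-- ===== PRECONDITION & SPEC =====
def Spec_first_existing_py (available : List String) (preferred : List String) (out : Option String) : Prop := out = first_existing_py_alt available preferred
instance (available : List String) (preferred : List String) (out : Option String) : Decidable (Spec_first_existing_py available preferred out) := by unfold Spec_first_existing_py; infer_instance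

-- ===== CLAIM (what is proved, stated in full; the proofs are below) =====
def Claim_equal_first_existing_py : Prop := ∀ (available : List String) (preferred : List String), Dom_first_existing_py available preferred → Spec_first_existing_py available preferred (first_existing_py available preferred)

-- ===== LEMMAS AND PROOFS =====

-- reference: last item of xs whose lowercase equals c (the value A's dict holds at key c)
def refScan (xs : List String) (c : String) : Option String :=
  xs.foldl (fun m item => if PySem.Str.lower item == c then some item else m) none

-- reference: A's preferred-scan expressed with refScan instead of the dict
def refLoop (available : List String) : List String → Option String
  | [] => none
  | c :: rest =>
    match refScan available c with
    | some m => some m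
    | none => refLoop available rest

lemma scan_general (xs : List String) (c : String) (m : Option String) :
    xs.foldl (fun m item => if PySem.Str.lower item == c then some item else m) m =
    match refScan xs c with | some it => some it | none => m := by
  induction xs generalizing m with
  | nil => rfl
  | cons x xs ih =>
    unfold refScan
    simp only [List.foldl_cons]
    rw [ih, ih (if PySem.Str.lower x == c then some x else none)]
    cases h : refScan xs c with
    | some it => simp
    | none => by_cases hx : PySem.Str.lower x = c <;> simp [hx]

lemma refScan_cons (c y : String) (ys : List String) :
    refScan (y :: ys) c =
      match refScan ys c with
      | some it => some it
      | none => if PySem.Str.lower y == c then some y else none := by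
  unfold refScan
  simp only [List.foldl_cons]
  rw [scan_general]
  rfl

lemma refScan_none_iff (xs : List String) (c : String) :
    refScan xs c = none ↔ ∀ y ∈ xs, (PySem.Str.lower y == c) = false := by
  induction xs with
  | nil => simp [refScan]
  | cons x xs ih =>
    rw [refScan_cons]
    cases h : refScan xs c with
    | some it =>
      constructor
      · intro h'; simp at h'
      · intro hall
        have hn : refScan xs c = none := ih.mpr (fun y hy => hall y (List.mem_cons_of_mem _ hy))
        rw [h] at hn; cases hn
    | none =>
      constructor
      · intro he y hy
        rcases List.mem_cons.mp hy with rfl | hy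
        · by_cases hx : PySem.Str.lower y = c
          · simp [hx] at he
          · simp [hx]
        · exact ih.mp h y hy
      · intro hall
        have hx := hall x (by simp)
        simp [hx]

-- proof-side step function phrased with index? instead of the rank dict
def bStepI (preferred : List String) (best : Option (Nat × String)) (item : String) : Option (Nat × String) :=
  match PySem.List.index? preferred (PySem.Str.lower item) with
  | some i =>
    match best with
    | none => some (i, item)
    | some (j, _) => if i ≤ j then some (i, item) else best
  | none => best

lemma rank_loop_get (pref : List String) (c : String) (d : PySem.Dict String Nat) (i : Nat) :
    ((pref.foldl
      (fun (s : PySem.Dict String Nat × Nat) cand =>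
        (if s.1.contains cand then s.1 else s.1.insert cand s.2, s.2 + 1)) (d, i)).1).get? c =
    if d.contains c then d.get? c else (PySem.List.index? pref c).map (· + i) := by
  induction pref generalizing d i with
  | nil => cases h : d.contains c <;> simp [h, PySem.Dict.get?_eq_none_iff_contains, PySem.List.index?]
  | cons x xs ih =>
    simp only [List.foldl_cons]
    rw [ih]
    by_cases hx : x = c
    · subst hx
      cases h : d.contains x with
      | true => simp [h]
      | false =>
        simp only [Bool.false_eq_true, if_false]
        rw [PySem.Dict.contains_insert_self, PySem.List.index?_cons_self]
        simp [PySem.Dict.get?_insert_self]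
    · have hget : ∀ v, (d.insert x v).get? c = d.get? c :=
        fun v => PySem.Dict.get?_insert_of_ne _ _ (Ne.symm hx)
      have hcon : ∀ v, (d.insert x v).contains c = d.contains c := by
        intro v
        rw [PySem.Dict.contains_insert]
        simp [Ne.symm hx]
      rw [PySem.List.index?_cons_of_ne xs hx]
      cases h : d.contains c with
      | true => cases hd : d.contains x <;> simp [h, hcon, hget]
      | false =>
        cases hd : d.contains x <;>
          simp [h, hcon, Option.map_map] <;>
          congr 1 <;> funext k <;> omega

lemma bRank_get (pref : List String) (c : String) :
    (bRank pref).get? c = PySem.List.index? pref c := by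
  unfold bRank
  rw [rank_loop_get]
  simp [PySem.Dict.contains_empty]

lemma bStep_eq_bStepI (pref : List String) :
    bStep (bRank pref) = bStepI pref := by
  funext best item
  unfold bStep bStepI
  rw [bRank_get]

lemma bStep_nil (xs : List String) (m : Option (Nat × String)) :
    xs.foldl (bStepI []) m = m := by
  induction xs generalizing m with
  | nil => rfl
  | cons x xs ih => simp [List.foldl_cons, bStepI, PySem.List.index?, ih]

lemma bStep_shift (c : String) (rest : List String) (xs : List String)
    (h : ∀ y ∈ xs, (PySem.Str.lower y == c) = false) (m : Option (Nat × String)) :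
    xs.foldl (bStepI (c :: rest)) (m.map (fun p => (p.1 + 1, p.2))) =
    (xs.foldl (bStepI rest) m).map (fun p => (p.1 + 1, p.2)) := by
  induction xs generalizing m with
  | nil => rfl
  | cons x xs ih =>
    have hx : (PySem.Str.lower x == c) = false := h x (by simp)
    have hx' : c ≠ PySem.Str.lower x := fun he => by simp [he] at hx
    have hstep : bStepI (c :: rest) (m.map (fun p => (p.1 + 1, p.2))) x =
        (bStepI rest m x).map (fun p => (p.1 + 1, p.2)) := by
      unfold bStepI
      rw [PySem.List.index?_cons_of_ne rest hx']
      cases hi : PySem.List.index? rest (PySem.Str.lower x) with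
      | none => simp
      | some i =>
        cases m with
        | none => simp
        | some p =>
          rcases p with ⟨j, y⟩
          simp only [Option.map]
          by_cases hij : i ≤ j
          · simp [hij, Nat.add_le_add_iff_right.mpr hij]
          · have h2 : ¬ i + 1 ≤ j + 1 := by omega
            simp [hij, h2]
    simp only [List.foldl_cons, hstep]
    exact ih (fun y hy => h y (by simp [hy])) _

lemma foldB_zero (c : String) (rest : List String) (xs : List String) (x : String) :
    xs.foldl (bStepI (c :: rest)) (some (0, x)) =
    some (0, match refScan xs c with | some it => it | none => x) := by
  induction xs generalizing x with
  | nil => rfl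
  | cons y ys ih =>
    rw [refScan_cons]
    by_cases hy : PySem.Str.lower y = c
    · have hstep : bStepI (c :: rest) (some (0, x)) y = some (0, y) := by
        unfold bStepI; rw [hy, PySem.List.index?_cons_self]; simp
      simp only [List.foldl_cons, hstep, ih]
      cases h : refScan ys c <;> simp [hy]
    · have hyc : c ≠ PySem.Str.lower y := Ne.symm hy
      have hstep : bStepI (c :: rest) (some (0, x)) y = some (0, x) := by
        unfold bStepI
        rw [PySem.List.index?_cons_of_ne rest hyc]
        cases hi : PySem.List.index? rest (PySem.Str.lower y) with
        | none => simp
        | some i => simp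
      simp only [List.foldl_cons, hstep, ih]
      cases h : refScan ys c <;> simp [hy]

lemma foldB_hit (c : String) (rest : List String) (xs : List String) (it : String)
    (h : refScan xs c = some it) (m : Option (Nat × String)) :
    xs.foldl (bStepI (c :: rest)) m = some (0, it) := by
  induction xs generalizing m with
  | nil => simp [refScan] at h
  | cons y ys ih =>
    rw [refScan_cons] at h
    by_cases hy : PySem.Str.lower y = c
    · have hstep : bStepI (c :: rest) m y = some (0, y) := by
        unfold bStepI; rw [hy, PySem.List.index?_cons_self]
        cases m with
        | none => simp
        | some p => rcases p with ⟨j, z⟩; simp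
      simp only [List.foldl_cons, hstep, foldB_zero]
      cases hys : refScan ys c <;> rw [hys] at h <;> simp [hy] at h <;> simp [h]
    · have hys : refScan ys c = some it := by
        cases hz : refScan ys c with
        | none => rw [hz] at h; simp [hy] at h
        | some v => rw [hz] at h; simp at h; simp [h]
      simp only [List.foldl_cons]
      exact ih hys _

lemma foldB_eq_refLoop (preferred available : List String) :
    (match available.foldl (bStepI preferred) none with
     | some (_, item) => some item
     | none => none) = refLoop available preferred := by
  induction preferred with
  | nil => rw [bStep_nil]; rfl
  | cons c rest ih =>
    cases h : refScan available c with
    | some it =>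
      rw [foldB_hit c rest available it h]
      simp [refLoop, h]
    | none =>
      have hall := (refScan_none_iff available c).mp h
      have hs := bStep_shift c rest available hall none
      simp only [Option.map_none] at hs
      rw [hs]
      simp only [refLoop, h]
      rw [← ih]
      cases available.foldl (bStepI rest) none with
      | none => rfl
      | some p => rcases p with ⟨i, x⟩; rfl

-- A's dict lookup equals the last-wins scan
lemma dict_get_eq_scan (available : List String) (c : String) (d : PySem.Dict String String) :
    (available.foldl (fun d item => d.insert (PySem.Str.lower item) item) d).get? c =
    available.foldl (fun m item => if PySem.Str.lower item == c then some item else m) (d.get? c) := by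
  induction available generalizing d with
  | nil => rfl
  | cons x xs ih =>
    simp only [List.foldl_cons, ih]
    congr 1
    rw [PySem.Dict.get?_insert]
    by_cases h : c = PySem.Str.lower x
    · simp [h]
    · simp [h, beq_iff_eq, Ne.symm h]

lemma aLoop_eq_refLoop (available preferred : List String) :
    aLoop (aDict available) preferred = refLoop available preferred := by
  induction preferred with
  | nil => rfl
  | cons c rest ih =>
    simp only [aLoop, refLoop, ih]
    have hd : (aDict available).get? c = refScan available c := by
      unfold aDict refScan
      rw [dict_get_eq_scan, PySem.Dict.get?_empty, scan_general]
    rw [hd]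

-- ===== VERDICT (by name: the statement is the Claim_ definition above) =====
theorem first_existing_py_spec : Claim_equal_first_existing_py := by
  intro available preferred _
  unfold Spec_first_existing_py first_existing_py first_existing_py_alt
  rw [bStep_eq_bStepI, aLoop_eq_refLoop, ← foldB_eq_refLoop]
  cases h : available.foldl (bStepI preferred) none with
  | none => rfl
  | some p => rcases p with ⟨i, x⟩; rfl
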